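-- pv_equiv track=rewrite | github.com/OmarElawady/pless | pless/pgn.py | extract_moves
-- ===== SOURCE A (Python) =====
-- def eliminate_comments(pgn_defintion):
--     res = ""
--     in_comment = False
--     comment_type = ";"
--     for c in pgn_defintion:
--         if in_comment:
--             if comment_type == ";" and c == "\n":
--                 if c == "\n":
--                     res += "\n"
--                 in_comment = False
--             elif comment_type == "{" and c == "}":
--                 in_comment = False
--         else:
--             if c == "{":
--                 in_comment = True
--                 comment_type = "{"
--             elif c == ";":
--                 in_comment = True
--                 comment_type = ";"
--             else:
--                 res += c
--     return res
--
-- def extract_moves(pgn_defintion):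
--     without_comments = eliminate_comments(pgn_defintion)
--     moves = without_comments.replace("\n", " ").split(" ")
--     result = []
--     for e in moves:
--         if e and not e[0].isdigit():
--             result.append(e)
--     return result
-- ===== SOURCE B (Python) =====
-- def extract_moves(pgn_defintion):
--     # Jump-based comment stripper: find the next comment opener and skip the
--     # whole comment at once instead of walking a char-by-char state machine.
--     parts = []
--     i = 0
--     n = len(pgn_defintion)
--     while i < n:
--         b = pgn_defintion.find("{", i)
--         s = pgn_defintion.find(";", i)
--         if b == -1 and s == -1:
--             parts.append(pgn_defintion[i:])
--             break
--         j = min(x for x in (b, s) if x != -1)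
--         parts.append(pgn_defintion[i:j])
--         if pgn_defintion[j] == "{":
--             k = pgn_defintion.find("}", j + 1)
--             i = n if k == -1 else k + 1
--         else:
--             k = pgn_defintion.find("\n", j + 1)
--             i = n if k == -1 else k  # keep the newline itself
--     text = "".join(parts)
--     return [e for e in text.replace("\n", " ").split(" ") if e and not e[0].isdigit()]
-- ===== Notes on version B (the rewrite author's own statement) =====
-- stated objective: faster
-- what changed: Replaces the char-by-char comment-stripping state machine with a jump-based scanner that finds each comment opener with str.find and skips/copies whole slices at once, and replaces the tokenizing accumulator loop with a list comprehension.
import Mathlib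
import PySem

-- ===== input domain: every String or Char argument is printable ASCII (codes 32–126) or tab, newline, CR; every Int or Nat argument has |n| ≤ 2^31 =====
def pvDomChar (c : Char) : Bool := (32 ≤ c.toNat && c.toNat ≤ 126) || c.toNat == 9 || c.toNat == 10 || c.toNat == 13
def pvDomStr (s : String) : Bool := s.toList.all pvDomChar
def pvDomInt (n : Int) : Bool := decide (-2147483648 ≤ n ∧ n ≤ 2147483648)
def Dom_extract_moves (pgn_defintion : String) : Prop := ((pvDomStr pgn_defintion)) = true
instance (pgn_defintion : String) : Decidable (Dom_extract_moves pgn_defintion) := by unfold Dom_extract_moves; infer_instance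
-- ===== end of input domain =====

-- B replaces A's char-by-char comment state machine by a jump-based scanner that finds
-- each comment opener and skips/copies whole slices at once (same O(n), measured faster by a constant factor).

-- ===== PORT A =====
-- the for-loop of eliminate_comments as the obvious structural recursion over the
-- characters, carrying the (in_comment, comment_type) state; output chars are emitted
-- in order instead of appended to an accumulator string (same string).
def pvElimA : List Char → Bool → Char → List Char
  | [], _, _ => []
  | c :: rest, inC, ty =>
    if inC then
      if ty == ';' && c == '\n' then
        (if c == '\n' then '\n' :: pvElimA rest false ty else pvElimA rest false ty)
      else if ty == '{' && c == '}' then pvElimA rest false ty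
      else pvElimA rest inC ty
    else
      if c == '{' then pvElimA rest true '{'
      else if c == ';' then pvElimA rest true ';'
      else c :: pvElimA rest false ty

def eliminate_comments (pgn_defintion : String) : String :=
  String.ofList (pvElimA pgn_defintion.toList false ';')

-- the token test 'e and not e[0].isdigit()' (e[0] exists iff e is nonempty)
def pvKeepTok (e : String) : Bool :=
  e != "" && (match e.toList with | c :: _ => !PySem.Chars.isdigit c | [] => false)

def extract_moves (pgn_defintion : String) : List String :=
  let without_comments := eliminate_comments pgn_defintion
  -- split? is 'some' whenever sep ≠ "", so .getD [] is exact for .split(" ")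
  let moves := (PySem.Str.split? (PySem.Str.replace without_comments "\n" " ") " ").getD []
  moves.foldl (fun result e => if pvKeepTok e then result ++ [e] else result) []

-- ===== PORT B =====
-- Source B's while loop: each round takes the text up to the next comment opener
-- (min of find('{',i), find(';',i) = first char in {'{',';'}, so take/dropWhile is
-- exact for find+slice here), then jumps past the comment: after the matching '}'
-- for brace comments, to the newline (kept) for ';' comments; unclosed comments
-- consume to the end.
def pvElimB (cs : List Char) : List Char :=
  let pre := cs.takeWhile (fun c => !(c == '{' || c == ';'))
  let rest := cs.dropWhile (fun c => !(c == '{' || c == ';'))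
  if hr : rest = [] then pre
  else if rest.head hr == '{' then pre ++ pvElimB ((rest.tail.dropWhile (· != '}')).drop 1)
  else pre ++ pvElimB (rest.tail.dropWhile (· != '\n'))
termination_by cs.length
decreasing_by
  all_goals
    have h1 := List.length_dropWhile_le (fun c => !(c == '{' || c == ';')) cs
    cases hd : cs.dropWhile (fun c => !(c == '{' || c == ';')) with
    | nil => exact absurd hd hr
    | cons d td =>
      rw [hd] at h1
      simp only [List.length_cons] at h1
      simp only [List.tail_cons]
      first
      | (have h2 := List.length_dropWhile_le (fun c => c != '}') td
         have h3 := List.length_drop (l := td.dropWhile (fun c => c != '}')) (i := 1)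
         omega)
      | (have h2 := List.length_dropWhile_le (fun c => c != '\n') td
         omega)

def extract_moves_alt (pgn_defintion : String) : List String :=
  let text := String.ofList (pvElimB pgn_defintion.toList)
  ((PySem.Str.split? (PySem.Str.replace text "\n" " ") " ").getD []).filter pvKeepTok

-- ===== PRECONDITION & SPEC =====
def Spec_extract_moves (pgn_defintion : String) (out : List String) : Prop := out = extract_moves_alt pgn_defintion
instance (pgn_defintion : String) (out : List String) : Decidable (Spec_extract_moves pgn_defintion out) := by unfold Spec_extract_moves; infer_instance

-- ===== CLAIM (what is proved, stated in full; the proofs are below) =====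
def Claim_equal_extract_moves : Prop := ∀ (pgn_defintion : String), Dom_extract_moves pgn_defintion → Spec_extract_moves pgn_defintion (extract_moves pgn_defintion)

-- ===== LEMMAS AND PROOFS =====

-- an ordinary (non-opener) character passes straight through B's scanner
lemma pvElimB_cons_ord (c : Char) (tl : List Char)
    (h1 : (c == '{') = false) (h2 : (c == ';') = false) :
    pvElimB (c :: tl) = c :: pvElimB tl := by
  have hsc : List.dropWhile (fun c => !(c == '{' || c == ';')) (c :: tl)
      = List.dropWhile (fun c => !(c == '{' || c == ';')) tl := by
    simp [List.dropWhile_cons, h1, h2]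
  have htk : List.takeWhile (fun c => !(c == '{' || c == ';')) (c :: tl)
      = c :: List.takeWhile (fun c => !(c == '{' || c == ';')) tl := by
    simp [List.takeWhile_cons, h1, h2]
  rw [pvElimB.eq_def]
  conv_rhs => rw [pvElimB.eq_def]
  rw [hsc, htk]
  cases hd : List.dropWhile (fun c => !(c == '{' || c == ';')) tl with
  | nil => simp
  | cons d td =>
    rw [dif_neg (by simp), dif_neg (by simp)]
    split <;> simp

-- the three DFA states of A against B's jump scanner, by strong induction on length
lemma pvElim_main : ∀ n (cs : List Char), cs.length ≤ n →
    ((∀ ty, pvElimA cs false ty = pvElimB cs) ∧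
     pvElimA cs true '{' = pvElimB ((cs.dropWhile (· != '}')).drop 1) ∧
     pvElimA cs true ';' = pvElimB (cs.dropWhile (· != '\n'))) := by
  intro n
  induction n with
  | zero =>
    intro cs h
    have : cs = [] := List.eq_nil_of_length_eq_zero (Nat.le_zero.mp h)
    subst this
    refine ⟨fun ty => ?_, ?_, ?_⟩ <;> rw [pvElimA, pvElimB.eq_def] <;> simp
  | succ n ih =>
    intro cs h
    cases cs with
    | nil =>
      refine ⟨fun ty => ?_, ?_, ?_⟩ <;> rw [pvElimA, pvElimB.eq_def] <;> simp
    | cons c tl =>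
      simp only [List.length_cons, Nat.add_le_add_iff_right] at h
      obtain ⟨ih1, ih2, ih3⟩ := ih tl h
      refine ⟨fun ty => ?_, ?_, ?_⟩
      · -- not in comment
        by_cases hb : c = '{'
        · subst hb
          rw [pvElimA, pvElimB.eq_def]
          simp [List.dropWhile_cons, List.takeWhile_cons, ih2, List.drop_one]
        · by_cases hs : c = ';'
          · subst hs
            rw [pvElimA, pvElimB.eq_def]
            simp [List.dropWhile_cons, List.takeWhile_cons, ih3]
          · rw [pvElimA, pvElimB_cons_ord c tl (by simp [hb]) (by simp [hs])]
            simp [hb, hs, ih1]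
      · -- inside a '{' comment
        by_cases hc : c = '}'
        · subst hc
          rw [pvElimA]
          rw [List.dropWhile_cons]
          simp [ih1, List.drop_one]
        · rw [pvElimA, List.dropWhile_cons]
          have hne : (c != '}') = true := by simp [hc]
          rw [if_pos hne]
          simp only [show (('{' : Char) == ';') = false from rfl, Bool.false_and,
            Bool.if_false_left]
          simp [hc, ih2]
      · -- inside a ';' comment
        by_cases hc : c = '\n'
        · subst hc
          have hdw : List.dropWhile (fun x => x != '\n') ('\n' :: tl) = '\n' :: tl := by simp
          rw [pvElimA, hdw, pvElimB_cons_ord '\n' tl (by decide) (by decide)]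
          simp [ih1]
        · rw [pvElimA, List.dropWhile_cons]
          have hne : (c != '\n') = true := by simp [hc]
          rw [if_pos hne]
          simp [hc, show ((';' : Char) == '{') = false from rfl, ih3]

lemma pvElim_eq (cs : List Char) : pvElimA cs false ';' = pvElimB cs :=
  (pvElim_main cs.length cs le_rfl).1 ';'

-- ===== VERDICT (by name: the statement is the Claim_ definition above) =====
theorem extract_moves_spec : Claim_equal_extract_moves := by
  intro pgn _
  unfold Spec_extract_moves extract_moves extract_moves_alt eliminate_comments
  simp only [pvElim_eq, PySem.List.foldl_append_if_eq_filter, List.nil_append]
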